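-- pv_equiv track=rewrite | github.com/MrWaltTG1/RienNeVaPlus | RienNeVaPlus/scripts/game_functions.py | calculate_legend_chips
-- ===== SOURCE A (Python) =====
-- def calculate_legend_chips(budget: int):
--     """Returns a dict of the amount of chips to put in the legend"""
--     max_chips = 5
--     chip_dict = {
--         "one": 0,
--         "five": 0,
--         "twentyfive": 0,
--         "hundred": 0,
--         "five hundred": 0,
--         "thousand": 0,
--     }
--     temp_budget = budget
--     while temp_budget >= 1000:
--         if not chip_dict["thousand"] >= max_chips:
--             chip_dict["thousand"] += 1
--             temp_budget -= 1000
--         else: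
--             break
--     temp_budget = budget
--     while temp_budget >= 500:
--         if not chip_dict["five hundred"] >= max_chips:
--             chip_dict["five hundred"] += 1
--             temp_budget -= 500
--         else:
--             break
--     temp_budget = budget
--     while temp_budget >= 100:
--         if not chip_dict["hundred"] >= max_chips:
--             chip_dict["hundred"] += 1
--             temp_budget -= 100
--         else:
--             break
--     temp_budget = budget
--     while temp_budget >= 25:
--         if not chip_dict["twentyfive"] >= max_chips:
--             chip_dict["twentyfive"] += 1
--             temp_budget -= 25
--         else:
--             break
--     temp_budget = budget
--     while temp_budget >= 5:
--         if not chip_dict["five"] >= max_chips: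
--             chip_dict["five"] += 1
--             temp_budget -= 5
--         else:
--             break
--     temp_budget = budget
--     while temp_budget >= 1:
--         if not chip_dict["one"] >= max_chips:
--             chip_dict["one"] += 1
--             temp_budget -= 1
--         else:
--             break
--     return chip_dict
-- ===== SOURCE B (Python) =====
-- def calculate_legend_chips(budget: int):
--     """Returns a dict of the amount of chips to put in the legend"""
--     table = [("one", 1), ("five", 5), ("twentyfive", 25),
--              ("hundred", 100), ("five hundred", 500), ("thousand", 1000)]
--     return {key: max(0, min(5, budget // value)) for key, value in table}
-- ===== Notes on version B (the rewrite author's own statement) =====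
-- stated objective: simpler
-- what changed: Replaces the six hand-written capped while-loops with a single comprehension over a (key, denomination) table using the closed form max(0, min(5, budget // value)).
import Mathlib
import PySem

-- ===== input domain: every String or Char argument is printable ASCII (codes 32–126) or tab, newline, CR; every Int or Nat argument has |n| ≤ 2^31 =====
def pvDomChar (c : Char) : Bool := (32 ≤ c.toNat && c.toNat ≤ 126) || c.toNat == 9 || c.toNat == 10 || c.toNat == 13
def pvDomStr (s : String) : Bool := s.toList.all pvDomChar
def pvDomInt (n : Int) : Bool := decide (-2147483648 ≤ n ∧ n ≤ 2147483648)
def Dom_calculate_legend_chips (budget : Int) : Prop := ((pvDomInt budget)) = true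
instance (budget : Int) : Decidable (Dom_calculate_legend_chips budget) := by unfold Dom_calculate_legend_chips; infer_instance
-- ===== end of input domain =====

-- B replaces A's six capped while-loops by one table of denominations with the closed form max 0 (min 5 (budget // v)); objective: simpler.


-- ===== PORT A =====
-- one while-loop of A: `while temp >= v: if not count >= 5: count += 1; temp -= v else: break`
def chipLoop (v temp count : Int) : Int :=
  if temp ≥ v then
    if ¬ count ≥ 5 then chipLoop v (temp - v) (count + 1) else count
  else count
termination_by (5 - count).toNat
decreasing_by omega

-- chip_dict is initialised with the six keys (insertion order "one" … "thousand") and each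
-- while-loop updates exactly one key starting from 0 with temp_budget reset to budget.
def calculate_legend_chips (budget : Int) : List (String × Int) :=
  [("one", chipLoop 1 budget 0), ("five", chipLoop 5 budget 0),
   ("twentyfive", chipLoop 25 budget 0), ("hundred", chipLoop 100 budget 0),
   ("five hundred", chipLoop 500 budget 0), ("thousand", chipLoop 1000 budget 0)]

-- ===== PORT B =====
def calculate_legend_chips_alt (budget : Int) : List (String × Int) :=
  let table : List (String × Int) :=
    [("one", 1), ("five", 5), ("twentyfive", 25),
     ("hundred", 100), ("five hundred", 500), ("thousand", 1000)]
  table.map (fun kv => (kv.1, max 0 (min 5 (PySem.Int.floordiv budget kv.2))))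

-- ===== PRECONDITION & SPEC =====
def Spec_calculate_legend_chips (budget : Int) (out : List (String × Int)) : Prop := out = calculate_legend_chips_alt budget
instance (budget : Int) (out : List (String × Int)) : Decidable (Spec_calculate_legend_chips budget out) := by unfold Spec_calculate_legend_chips; infer_instance

-- ===== CLAIM (what is proved, stated in full; the proofs are below) =====
def Claim_equal_calculate_legend_chips : Prop := ∀ (budget : Int), Dom_calculate_legend_chips budget → Spec_calculate_legend_chips budget (calculate_legend_chips budget)

-- ===== LEMMAS AND PROOFS =====
lemma chipLoop_eq (v : Int) (hv : 0 < v) :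
    ∀ (n : Nat) (count temp : Int), count = 5 - (n : Int) → 0 ≤ count →
      chipLoop v temp count = min 5 (count + max 0 (temp / v)) := by
  intro n
  induction n with
  | zero =>
    intro count temp hc _
    rw [chipLoop]
    simp at hc
    split_ifs <;> omega
  | succ m ih =>
    intro count temp hc hc0
    rw [chipLoop]
    by_cases h1 : temp ≥ v
    · have hlt : count < 5 := by omega
      simp [h1, not_le.mpr hlt]
      have hrec := ih (count + 1) (temp - v) (by omega) (by omega)
      rw [hrec]
      have hdiv : (temp - v) / v = temp / v - 1 := by
        have := Int.add_mul_ediv_right temp (-1) (ne_of_gt hv)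
        simpa [sub_eq_add_neg, neg_one_mul] using this
      have hge1 : 1 ≤ temp / v := by
        rw [Int.le_ediv_iff_mul_le hv]; omega
      omega
    · simp [h1]
      have hle0 : temp / v ≤ 0 := by
        have : temp / v < 1 := by rw [Int.ediv_lt_iff_lt_mul hv]; omega
        omega
      omega

lemma chipLoop_zero (v budget : Int) (hv : 0 < v) :
    chipLoop v budget 0 = max 0 (min 5 (PySem.Int.floordiv budget v)) := by
  rw [PySem.Int.floordiv_eq_ediv_of_pos hv,
      chipLoop_eq v hv 5 0 budget (by norm_num) le_rfl]
  omega

-- ===== VERDICT (by name: the statement is the Claim_ definition above) =====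
theorem calculate_legend_chips_spec : Claim_equal_calculate_legend_chips := by
  intro budget _
  unfold Spec_calculate_legend_chips calculate_legend_chips calculate_legend_chips_alt
  simp [List.map, chipLoop_zero _ budget (by norm_num : (0:Int) < 1),
        chipLoop_zero _ budget (by norm_num : (0:Int) < 5),
        chipLoop_zero _ budget (by norm_num : (0:Int) < 25),
        chipLoop_zero _ budget (by norm_num : (0:Int) < 100),
        chipLoop_zero _ budget (by norm_num : (0:Int) < 500),
        chipLoop_zero _ budget (by norm_num : (0:Int) < 1000)]
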